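-- pv_equiv track=rewrite | github.com/yubinbai/pcuva-problems | UVa 10306 - e-Coins/main.py | solve
-- ===== SOURCE A (Python) =====
-- INF = 1 << 31
--
-- def solve(par):
--     M, S, coins = par
--     memo = []
--     for i in range(S + 1):
--         memo.append([INF] * (S + 1))
--     memo[0][0] = 0
--     for coin in coins:
--         for i in range(coin[0], S + 1):
--             for j in range(coin[1], S + 1):
--                 memo[i][j] = min(
--                     memo[i][j], memo[i - coin[0]][j - coin[1]] + 1)
--
--     minNum = INF
--     for i in range(S + 1):
--         for j in range(S + 1):
--             if i ** 2 + j ** 2 == S ** 2: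
--                 minNum = min(minNum, memo[i][j])
--     if minNum == INF:
--         return 0
--     else:
--         return minNum
-- ===== SOURCE B (Python) =====
-- INF = 1 << 31
--
-- def solve(par):
--     M, S, coins = par
--     # BFS over the state grid: each state holds its coin count; unit-cost edges add one coin.
--     dist = {(0, 0): 0}
--     queue = [(0, 0)]
--     head = 0
--     while head < len(queue):
--         x, y = queue[head]
--         head += 1
--         d = dist[(x, y)]
--         for a, b in coins:
--             v = (x + a, y + b)
--             if v[0] <= S and v[1] <= S and v not in dist:
--                 dist[v] = d + 1
--                 queue.append(v)
--     best = INF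
--     for (x, y), d in dist.items():
--         if x * x + y * y == S * S and d < best:
--             best = d
--     return 0 if best == INF else best
-- ===== Notes on version B (the rewrite author's own statement) =====
-- stated objective: alternative
-- what changed: B replaces A's per-coin relaxation sweeps over a full (S+1)x(S+1) DP array by a breadth-first search from (0,0) over the state grid with a FIFO queue and a visited-distance dictionary (unit-cost edges = one coin), visiting only reachable states, then takes the minimum recorded distance over the circle states.
import Mathlib
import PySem

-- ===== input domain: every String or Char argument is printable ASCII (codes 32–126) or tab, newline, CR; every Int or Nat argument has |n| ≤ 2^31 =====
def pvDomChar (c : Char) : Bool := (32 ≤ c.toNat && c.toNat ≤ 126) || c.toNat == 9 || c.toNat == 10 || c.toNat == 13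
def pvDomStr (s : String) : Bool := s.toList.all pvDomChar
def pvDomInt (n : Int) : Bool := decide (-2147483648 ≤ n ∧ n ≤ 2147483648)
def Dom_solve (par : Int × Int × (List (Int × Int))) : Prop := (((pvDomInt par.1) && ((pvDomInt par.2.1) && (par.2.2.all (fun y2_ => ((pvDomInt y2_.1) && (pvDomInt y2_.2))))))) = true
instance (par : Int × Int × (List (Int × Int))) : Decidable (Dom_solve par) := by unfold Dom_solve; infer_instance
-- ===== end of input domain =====

-- B replaces A's per-coin DP relaxation sweeps by a breadth-first search from (0,0) over the
-- state grid (unit-cost edges = one coin), visiting only reachable states (objective: alternative).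

-- ===== PORT A =====
def pvINF : Int := 1 <<< 31

-- memo[i][j] read/write; exact for the in-range non-negative indices Pre_solve guarantees
def pvGet2 (m : List (List Int)) (i j : Int) : Int :=
  PySem.List.pyGetD (PySem.List.pyGetD m i []) j 0

def pvSet2 (m : List (List Int)) (i j : Int) (v : Int) : List (List Int) :=
  PySem.List.pySetD m i (PySem.List.pySetD (PySem.List.pyGetD m i []) j v)

-- the body of A's 'for coin in coins:' loop (the two nested relaxation sweeps)
def pvCoinPass (S : Int) (m : List (List Int)) (c : Int × Int) : List (List Int) :=
  (PySem.List.pyRange c.1 (S + 1) 1).foldl (fun m i =>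
    (PySem.List.pyRange c.2 (S + 1) 1).foldl (fun m j =>
      pvSet2 m i j (min (pvGet2 m i j) (pvGet2 m (i - c.1) (j - c.2) + 1))) m) m

def solve (par : Int × Int × (List (Int × Int))) : Int :=
  let S := par.2.1
  let coins := par.2.2
  let memo : List (List Int) :=
    (PySem.List.pyRange 0 (S + 1) 1).foldl
      (fun m _ => m ++ [PySem.List.pyRepeat [pvINF] (S + 1)]) []
  let memo := pvSet2 memo 0 0 0
  let memo := coins.foldl (pvCoinPass S) memo
  let minNum :=
    (PySem.List.pyRange 0 (S + 1) 1).foldl (fun mn i =>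
      (PySem.List.pyRange 0 (S + 1) 1).foldl (fun mn j =>
        if i ^ 2 + j ^ 2 = S ^ 2 then min mn (pvGet2 memo i j) else mn) mn) pvINF
  if minNum = pvINF then 0 else minNum

-- ===== PORT B =====
-- the body of B's inner 'for a, b in coins:' loop: try one edge out of the dequeued state u
-- (state = (dist dictionary, list of newly enqueued states))
def pvStepB (S d : Int) (u : Int × Int) (st : PySem.Dict (Int × Int) Int × List (Int × Int))
    (c : Int × Int) : PySem.Dict (Int × Int) Int × List (Int × Int) :=
  let v := (u.1 + c.1, u.2 + c.2)
  if v.1 ≤ S ∧ v.2 ≤ S ∧ st.1.contains v = false then (st.1.insert v (d + 1), st.2 ++ [v]) else st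

-- B's 'while head < len(queue):' loop; 'pending' is queue[head:].  The fuel only makes the
-- recursion total; inside Pre_solve it never runs out (proved below).  'dist.getD u 0' ports
-- Python's dist[(x, y)]: every dequeued state was inserted when enqueued, so the key is present.
def pvBfsB (coins : List (Int × Int)) (S : Int) :
    Nat → PySem.Dict (Int × Int) Int → List (Int × Int) → PySem.Dict (Int × Int) Int
  | _, dist, [] => dist
  | 0, dist, _ :: _ => dist
  | fuel + 1, dist, u :: rest =>
    let d := dist.getD u 0
    let st := coins.foldl (pvStepB S d u) (dist, ([] : List (Int × Int)))
    pvBfsB coins S fuel st.1 (rest ++ st.2)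

def solve_alt (par : Int × Int × (List (Int × Int))) : Int :=
  let S := par.2.1
  let coins := par.2.2
  let dist := pvBfsB coins S (2 * ((S + 1).toNat * (S + 1).toNat))
    (PySem.Dict.ofList [(((0 : Int), (0 : Int)), (0 : Int))]) [(0, 0)]
  let best := dist.items.foldl
    (fun best p => if p.1.1 * p.1.1 + p.1.2 * p.1.2 = S * S ∧ p.2 < best then p.2 else best) pvINF
  if best = pvINF then 0 else best

-- ===== PRECONDITION & SPEC =====
-- Pre_solve excludes exactly the inputs where A raises IndexError: S < 0, or a coin whose
-- loops are entered (both components ≤ S) with a negative component (then i - coin[0] or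
-- j - coin[1] exceeds S at the end of the sweep).
def Pre_solve (par : Int × Int × (List (Int × Int))) : Prop :=
  0 ≤ par.2.1 ∧ ∀ c ∈ par.2.2,
    ¬(c.1 ≤ par.2.1 ∧ c.2 ≤ par.2.1 ∧ (c.1 < 0 ∨ c.2 < 0))
instance (par : Int × Int × (List (Int × Int))) : Decidable (Pre_solve par) := by
  unfold Pre_solve; infer_instance

def pvWitness_solve : (Int × Int × (List (Int × Int))) := (1, 2, [(1, 0), (0, 1)])

def Spec_solve (par : Int × Int × (List (Int × Int))) (out : Int) : Prop := out = solve_alt par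
instance (par : Int × Int × (List (Int × Int))) (out : Int) : Decidable (Spec_solve par out) := by
  unfold Spec_solve; infer_instance

-- ===== CLAIM (what is proved, stated in full; the proofs are below) =====
def Claim_equal_solve : Prop := ∀ (par : Int × Int × (List (Int × Int))), Dom_solve par → Pre_solve par → Spec_solve par (solve par)

-- ===== LEMMAS AND PROOFS =====

-- grid membership, allowed representations, coordinate sums
def pvInG (S x y : Int) : Prop := 0 ≤ x ∧ x ≤ S ∧ 0 ≤ y ∧ y ≤ S

def pvOK (allowed : List (Int × Int)) (S : Int) (l : List (Int × Int)) : Prop :=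
  ∀ c ∈ l, c ∈ allowed ∧ 0 ≤ c.1 ∧ c.1 ≤ S ∧ 0 ≤ c.2 ∧ c.2 ≤ S

def pvS1 (l : List (Int × Int)) : Int := (l.map Prod.fst).sum
def pvS2 (l : List (Int × Int)) : Int := (l.map Prod.snd).sum

def pvPreCoin (S : Int) (c : Int × Int) : Prop :=
  ¬(c.1 ≤ S ∧ c.2 ≤ S ∧ (c.1 < 0 ∨ c.2 < 0))

-- the extremal properties of A's table
def pvSound (coins : List (Int × Int)) (S : Int) (T : Int → Int → Int) : Prop :=
  ∀ x y, pvInG S x y → T x y ≤ pvINF ∧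
    (T x y = pvINF ∨ ∃ l, pvOK coins S l ∧ pvS1 l = x ∧ pvS2 l = y ∧ (l.length : Int) = T x y)

def pvComp (allowed : List (Int × Int)) (S : Int) (T : Int → Int → Int) : Prop :=
  ∀ l, pvOK allowed S l → pvS1 l ≤ S → pvS2 l ≤ S →
    T (pvS1 l) (pvS2 l) ≤ (l.length : Int)

-- table well-formedness for A's list of lists
def pvWF (S : Int) (m : List (List Int)) : Prop :=
  m.length = (S + 1).toNat ∧ ∀ r ∈ m, r.length = (S + 1).toNat

lemma pvINF_pos : 0 < pvINF := by decide

-- ---- basic sum lemmas ----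
lemma pvS1_cons (x : Int × Int) (t : List (Int × Int)) : pvS1 (x :: t) = x.1 + pvS1 t := by
  simp [pvS1]
lemma pvS2_cons (x : Int × Int) (t : List (Int × Int)) : pvS2 (x :: t) = x.2 + pvS2 t := by
  simp [pvS2]
lemma pvS1_append (l t : List (Int × Int)) : pvS1 (l ++ t) = pvS1 l + pvS1 t := by
  simp [pvS1]
lemma pvS2_append (l t : List (Int × Int)) : pvS2 (l ++ t) = pvS2 l + pvS2 t := by
  simp [pvS2]
lemma pvS1_nonneg (l : List (Int × Int)) (h : ∀ c ∈ l, 0 ≤ c.1) : 0 ≤ pvS1 l := by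
  apply List.sum_nonneg
  intro x hx
  rcases List.mem_map.1 hx with ⟨c, hc, rfl⟩
  exact h c hc
lemma pvS2_nonneg (l : List (Int × Int)) (h : ∀ c ∈ l, 0 ≤ c.2) : 0 ≤ pvS2 l := by
  apply List.sum_nonneg
  intro x hx
  rcases List.mem_map.1 hx with ⟨c, hc, rfl⟩
  exact h c hc

-- removing all copies of one coin from a representation
lemma pvSplit (c : Int × Int) (l : List (Int × Int)) :
    pvS1 l = pvS1 (l.filter (fun x => x ≠ c)) + (l.count c : Int) * c.1 ∧
    pvS2 l = pvS2 (l.filter (fun x => x ≠ c)) + (l.count c : Int) * c.2 ∧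
    (l.length : Int) = ((l.filter (fun x => x ≠ c)).length : Int) + (l.count c : Int) := by
  induction l with
  | nil => simp [pvS1, pvS2]
  | cons x t ih =>
    obtain ⟨ih1, ih2, ih3⟩ := ih
    by_cases hx : x = c
    · subst hx
      have hfc : (x :: t).filter (fun y => y ≠ x) = t.filter (fun y => y ≠ x) := by simp
      refine ⟨?_, ?_, ?_⟩
      · rw [pvS1_cons, hfc, List.count_cons_self, ih1]; push_cast; ring
      · rw [pvS2_cons, hfc, List.count_cons_self, ih2]; push_cast; ring
      · rw [hfc, List.count_cons_self]; simp only [List.length_cons] at *; push_cast; omega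
    · have hfc : (x :: t).filter (fun y => y ≠ c) = x :: t.filter (fun y => y ≠ c) := by
        simp [List.filter_cons, hx]
      have hcnt : (x :: t).count c = t.count c := by
        simp [List.count_cons, hx]
      refine ⟨?_, ?_, ?_⟩
      · rw [pvS1_cons, hfc, hcnt, pvS1_cons, ih1]; ring
      · rw [pvS2_cons, hfc, hcnt, pvS2_cons, ih2]; ring
      · rw [hfc, hcnt]; simp only [List.length_cons] at *; push_cast; omega

-- ---- grid get/set infrastructure ----
lemma pvGetD_int {α} (xs : List α) (i : Int) (d : α) (h0 : 0 ≤ i) :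
    PySem.List.pyGetD xs i d = xs.getD i.toNat d := by
  have h : ((i.toNat : Nat) : Int) = i := Int.toNat_of_nonneg h0
  conv_lhs => rw [← h]
  exact PySem.List.pyGetD_natCast xs i.toNat d

lemma pvGetD_set_eq {α} (l : List α) (n : Nat) (v d : α) (h : n < l.length) :
    (l.set n v).getD n d = v := by
  rw [List.getD_eq_getElem _ _ (by simpa using h)]
  simp [List.getElem_set]

lemma pvGetD_set_ne {α} (l : List α) (n m' : Nat) (v d : α) (h : n ≠ m') :
    (l.set n v).getD m' d = l.getD m' d := by
  by_cases hm : m' < l.length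
  · rw [List.getD_eq_getElem _ _ (by simpa using hm), List.getD_eq_getElem _ _ hm]
    simp [List.getElem_set, h]
  · rw [List.getD_eq_default _ _ (by simpa using hm), List.getD_eq_default _ _ (by omega)]

lemma pvRowLen {S : Int} {m : List (List Int)} (hS : 0 ≤ S) (hWF : pvWF S m)
    {i : Int} (h0 : 0 ≤ i) (h1 : i ≤ S) :
    (m.getD i.toNat ([] : List Int)).length = (S + 1).toNat := by
  obtain ⟨hm, hrows⟩ := hWF
  have hlt : i.toNat < m.length := by omega
  rw [List.getD_eq_getElem _ _ hlt]
  exact hrows _ (List.getElem_mem _)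

lemma pvWF_set2 {S : Int} {m : List (List Int)} (hS : 0 ≤ S) (hWF : pvWF S m)
    {i j : Int} (hij : pvInG S i j) (v : Int) : pvWF S (pvSet2 m i j v) := by
  obtain ⟨hi0, hiS, hj0, hjS⟩ := hij
  have hrl := pvRowLen hS hWF hi0 hiS
  obtain ⟨hm, hrows⟩ := hWF
  rw [pvSet2, PySem.List.pySetD_of_nonneg _ _ hi0, PySem.List.pySetD_of_nonneg _ _ hj0,
      pvGetD_int _ _ _ hi0]
  refine ⟨by simpa using hm, ?_⟩
  intro r hr
  rcases List.mem_or_eq_of_mem_set hr with h | h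
  · exact hrows r h
  · subst h
    rw [List.length_set]
    exact hrl

lemma pvGet2_set {S : Int} {m : List (List Int)} (hS : 0 ≤ S) (hWF : pvWF S m)
    {i j x y : Int} (hij : pvInG S i j) (hxy : pvInG S x y) (v : Int) :
    pvGet2 (pvSet2 m i j v) x y = if x = i ∧ y = j then v else pvGet2 m x y := by
  obtain ⟨hi0, hiS, hj0, hjS⟩ := hij
  obtain ⟨hx0, hxS, hy0, hyS⟩ := hxy
  have hrl := pvRowLen hS hWF hi0 hiS
  obtain ⟨hm, hrows⟩ := hWF
  have hilt : i.toNat < m.length := by omega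
  rw [pvSet2, PySem.List.pySetD_of_nonneg _ _ hi0, PySem.List.pySetD_of_nonneg _ _ hj0,
      pvGetD_int _ _ _ hi0, pvGet2, pvGet2,
      pvGetD_int _ _ _ hx0, pvGetD_int _ _ _ hy0, pvGetD_int _ _ _ hx0, pvGetD_int _ _ _ hy0]
  by_cases hxi : x = i
  · subst hxi
    rw [pvGetD_set_eq _ _ _ _ (by omega)]
    by_cases hyj : y = j
    · subst hyj
      rw [pvGetD_set_eq _ _ _ _ (by omega)]
      simp
    · rw [pvGetD_set_ne _ _ _ _ _ (by omega)]
      simp [hyj]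
  · rw [pvGetD_set_ne _ _ _ _ _ (by omega)]
    simp [hxi]

-- ---- the initial table ----
def pvMemo0 (S : Int) : List (List Int) :=
  (PySem.List.pyRange 0 (S + 1) 1).foldl
    (fun m _ => m ++ [PySem.List.pyRepeat [pvINF] (S + 1)]) []

lemma pvMemo0_eq (S : Int) :
    pvMemo0 S = List.replicate (S + 1).toNat (List.replicate (S + 1).toNat pvINF) := by
  rw [pvMemo0, PySem.List.foldl_append_singleton_eq_map, PySem.List.pyRepeat_singleton]
  simp [List.map_const', PySem.List.length_pyRange_one]

lemma pvWF_memo0 (S : Int) : pvWF S (pvMemo0 S) := by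
  rw [pvMemo0_eq]
  refine ⟨by simp, ?_⟩
  intro r hr
  rw [List.eq_of_mem_replicate hr]
  simp

lemma pvGet2_memo0 {S x y : Int} (h : pvInG S x y) : pvGet2 (pvMemo0 S) x y = pvINF := by
  obtain ⟨hx0, hxS, hy0, hyS⟩ := h
  rw [pvMemo0_eq, pvGet2, pvGetD_int _ _ _ hx0, pvGetD_int _ _ _ hy0]
  have h1 : x.toNat < (List.replicate (S + 1).toNat (List.replicate (S + 1).toNat pvINF)).length := by
    simp; omega
  rw [List.getD_eq_getElem _ _ h1, List.getElem_replicate]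
  have h2 : y.toNat < (List.replicate (S + 1).toNat pvINF).length := by simp; omega
  rw [List.getD_eq_getElem _ _ h2, List.getElem_replicate]

-- ---- A's relaxation pass, characterized ----
def pvRowF (S a b i : Int) (m : List (List Int)) (e : Int) : List (List Int) :=
  (PySem.List.pyRange b e 1).foldl
    (fun m j => pvSet2 m i j (min (pvGet2 m i j) (pvGet2 m (i - a) (j - b) + 1))) m

def pvOutF (S a b : Int) (m : List (List Int)) (e : Int) : List (List Int) :=
  (PySem.List.pyRange a e 1).foldl (fun m i => pvRowF S a b i m (S + 1)) m

lemma pvCoinPass_eq (S : Int) (m : List (List Int)) (c : Int × Int) :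
    pvCoinPass S m c = pvOutF S c.1 c.2 m (S + 1) := rfl

lemma pvRowA (S a b i : Int) (m : List (List Int)) (hS : 0 ≤ S)
    (ha0 : 0 ≤ a) (hb0 : 0 ≤ b) (hai : a ≤ i) (hiS : i ≤ S)
    (hWF : pvWF S m) :
    ∀ k : Nat, b + (k : Int) ≤ S + 1 →
      pvWF S (pvRowF S a b i m (b + (k : Int))) ∧
      (∀ x y, pvInG S x y → (x ≠ i ∨ y < b ∨ b + (k : Int) ≤ y) →
        pvGet2 (pvRowF S a b i m (b + (k : Int))) x y = pvGet2 m x y) ∧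
      (∀ j, b ≤ j → j < b + (k : Int) →
        pvGet2 (pvRowF S a b i m (b + (k : Int))) i j =
          min (pvGet2 m i j) (pvGet2 (pvRowF S a b i m (b + (k : Int))) (i - a) (j - b) + 1)) := by
  intro k
  induction k with
  | zero =>
    intro _
    rw [show b + ((0 : Nat) : Int) = b by push_cast; ring]
    rw [pvRowF, PySem.List.pyRange_one_eq_nil le_rfl]
    exact ⟨hWF, fun x y _ _ => rfl, fun j h1 h2 => absurd (lt_of_le_of_lt h1 h2) (lt_irrefl _)⟩
  | succ n ih =>
    intro hk
    have hc : (((n + 1 : Nat)) : Int) = (n : Int) + 1 := by push_cast; ring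
    rw [hc] at hk ⊢
    have hbn : b + (n : Int) ≤ S + 1 := by omega
    obtain ⟨iWF, iOut, iRec⟩ := ih hbn
    have hsplit : PySem.List.pyRange b (b + ((n : Int) + 1)) 1 =
        PySem.List.pyRange b (b + (n : Int)) 1 ++ [b + (n : Int)] := by
      have h := PySem.List.pyRange_one_succ_right (a := b) (b := b + (n : Int)) (by omega)
      rw [add_assoc] at h
      exact h
    set Fn := pvRowF S a b i m (b + (n : Int)) with hFn
    have hFdef : pvRowF S a b i m (b + ((n : Int) + 1)) =
        pvSet2 Fn i (b + (n : Int))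
          (min (pvGet2 Fn i (b + (n : Int)))
               (pvGet2 Fn (i - a) ((b + (n : Int)) - b) + 1)) := by
      rw [pvRowF, hsplit, List.foldl_append, List.foldl_cons, List.foldl_nil, hFn, pvRowF]
    have hinGw : pvInG S i (b + (n : Int)) := ⟨by omega, by omega, by omega, by omega⟩
    have hWF' : pvWF S (pvRowF S a b i m (b + ((n : Int) + 1))) := by
      rw [hFdef]; exact pvWF_set2 hS iWF hinGw _
    refine ⟨hWF', ?_, ?_⟩
    · intro x y hxy hcond
      rw [hFdef, pvGet2_set hS iWF hinGw hxy]
      have hne : ¬(x = i ∧ y = b + (n : Int)) := by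
        rintro ⟨rfl, rfl⟩; omega
      rw [if_neg hne]
      apply iOut x y hxy
      rcases hcond with h | h | h
      · exact Or.inl h
      · exact Or.inr (Or.inl h)
      · exact Or.inr (Or.inr (by omega))
    · intro j hbj hjlt
      have hinGj : pvInG S i j := ⟨by omega, by omega, by omega, by omega⟩
      have hinGp : pvInG S (i - a) (j - b) := ⟨by omega, by omega, by omega, by omega⟩
      by_cases hj : j = b + (n : Int)
      · subst hj
        rw [hFdef, pvGet2_set hS iWF hinGw hinGj, if_pos ⟨rfl, rfl⟩,
            pvGet2_set hS iWF hinGw hinGp]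
        have hm0 : pvGet2 Fn i (b + (n : Int)) = pvGet2 m i (b + (n : Int)) :=
          iOut _ _ hinGw (Or.inr (Or.inr le_rfl))
        by_cases hab : i - a = i ∧ (b + (n : Int)) - b = b + (n : Int)
        · -- a = 0 and b = 0: self-reference, the update is a no-op
          obtain ⟨h1, h2⟩ := hab
          have ha' : a = 0 := by omega
          have hb' : b = 0 := by omega
          rw [h1, h2, if_pos ⟨rfl, rfl⟩, hm0]
          have : min (pvGet2 m i (b + (n : Int))) (pvGet2 m i (b + (n : Int)) + 1) =
              pvGet2 m i (b + (n : Int)) := by omega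
          rw [this]
          omega
        · rw [if_neg hab, hm0]
      · have hjn : j < b + (n : Int) := by omega
        have hne1 : ¬(i = i ∧ j = b + (n : Int)) := by rintro ⟨_, rfl⟩; omega
        have hne2 : ¬(i - a = i ∧ j - b = b + (n : Int)) := by
          rintro ⟨h1, h2⟩
          have : a = 0 := by omega
          omega
        rw [hFdef, pvGet2_set hS iWF hinGw hinGj, if_neg hne1,
            pvGet2_set hS iWF hinGw hinGp, if_neg hne2]
        exact iRec j hbj hjn

lemma pvS1_singleton (c : Int × Int) : pvS1 [c] = c.1 := by simp [pvS1]
lemma pvS2_singleton (c : Int × Int) : pvS2 [c] = c.2 := by simp [pvS2]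

lemma pvRowA_full (S a b i : Int) (m : List (List Int)) (hS : 0 ≤ S)
    (ha0 : 0 ≤ a) (hb0 : 0 ≤ b) (hbS : b ≤ S) (hai : a ≤ i) (hiS : i ≤ S) (hWF : pvWF S m) :
    pvWF S (pvRowF S a b i m (S + 1)) ∧
    (∀ x y, pvInG S x y → (x ≠ i ∨ y < b) →
      pvGet2 (pvRowF S a b i m (S + 1)) x y = pvGet2 m x y) ∧
    (∀ j, b ≤ j → j ≤ S →
      pvGet2 (pvRowF S a b i m (S + 1)) i j =
        min (pvGet2 m i j) (pvGet2 (pvRowF S a b i m (S + 1)) (i - a) (j - b) + 1)) := by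
  have h := pvRowA S a b i m hS ha0 hb0 hai hiS hWF (S + 1 - b).toNat (by omega)
  rw [show b + (((S + 1 - b).toNat : Nat) : Int) = S + 1 by omega] at h
  obtain ⟨h1, h2, h3⟩ := h
  refine ⟨h1, ?_, fun j hj1 hj2 => h3 j hj1 (by omega)⟩
  intro x y hxy hc
  apply h2 x y hxy
  rcases hc with h | h
  · exact Or.inl h
  · exact Or.inr (Or.inl h)

lemma pvOutA (S a b : Int) (m : List (List Int)) (hS : 0 ≤ S)
    (ha0 : 0 ≤ a) (hb0 : 0 ≤ b) (hbS : b ≤ S) (hWF : pvWF S m) :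
    ∀ k : Nat, a + (k : Int) ≤ S + 1 →
      pvWF S (pvOutF S a b m (a + (k : Int))) ∧
      (∀ x y, pvInG S x y → (x < a ∨ a + (k : Int) ≤ x ∨ y < b) →
        pvGet2 (pvOutF S a b m (a + (k : Int))) x y = pvGet2 m x y) ∧
      (∀ x, a ≤ x → x < a + (k : Int) → ∀ j, b ≤ j → j ≤ S →
        pvGet2 (pvOutF S a b m (a + (k : Int))) x j =
          min (pvGet2 m x j) (pvGet2 (pvOutF S a b m (a + (k : Int))) (x - a) (j - b) + 1)) := by
  intro k
  induction k with
  | zero =>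
    intro _
    rw [show a + ((0 : Nat) : Int) = a by push_cast; ring]
    rw [pvOutF, PySem.List.pyRange_one_eq_nil le_rfl]
    exact ⟨hWF, fun _ _ _ _ => rfl, fun x h1 h2 => absurd (lt_of_le_of_lt h1 h2) (lt_irrefl _)⟩
  | succ n ih =>
    intro hk
    have hc : (((n + 1 : Nat)) : Int) = (n : Int) + 1 := by push_cast; ring
    rw [hc] at hk ⊢
    have han : a + (n : Int) ≤ S + 1 := by omega
    obtain ⟨iWF, iOut, iRec⟩ := ih han
    have hsplit : PySem.List.pyRange a (a + ((n : Int) + 1)) 1 =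
        PySem.List.pyRange a (a + (n : Int)) 1 ++ [a + (n : Int)] := by
      have h := PySem.List.pyRange_one_succ_right (a := a) (b := a + (n : Int)) (by omega)
      rw [add_assoc] at h
      exact h
    set Gn := pvOutF S a b m (a + (n : Int)) with hGn
    have hGdef : pvOutF S a b m (a + ((n : Int) + 1)) = pvRowF S a b (a + (n : Int)) Gn (S + 1) := by
      rw [pvOutF, hsplit, List.foldl_append, List.foldl_cons, List.foldl_nil, hGn, pvOutF]
    obtain ⟨rWF, rOut, rRec⟩ :=
      pvRowA_full S a b (a + (n : Int)) Gn hS ha0 hb0 hbS (by omega) (by omega) iWF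
    rw [hGdef]
    refine ⟨rWF, ?_, ?_⟩
    · intro x y hxy hcond
      have hxne : x ≠ a + (n : Int) ∨ y < b := by
        rcases hcond with h | h | h
        · exact Or.inl (by omega)
        · exact Or.inl (by omega)
        · exact Or.inr h
      rw [rOut x y hxy hxne]
      apply iOut x y hxy
      rcases hcond with h | h | h
      · exact Or.inl h
      · exact Or.inr (Or.inl (by omega))
      · exact Or.inr (Or.inr h)
    · intro x hax hxlt j hbj hjS
      by_cases hx : x = a + (n : Int)
      · subst hx
        have h1 := rRec j hbj hjS
        have h2 : pvGet2 Gn (a + (n : Int)) j = pvGet2 m (a + (n : Int)) j :=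
          iOut _ _ ⟨by omega, by omega, by omega, by omega⟩ (Or.inr (Or.inl (by omega)))
        rw [h1, h2]
      · have hout1 : pvGet2 (pvRowF S a b (a + (n : Int)) Gn (S + 1)) x j = pvGet2 Gn x j :=
          rOut x j ⟨by omega, by omega, by omega, by omega⟩ (Or.inl (by omega))
        have hout2 : pvGet2 (pvRowF S a b (a + (n : Int)) Gn (S + 1)) (x - a) (j - b) =
            pvGet2 Gn (x - a) (j - b) :=
          rOut _ _ ⟨by omega, by omega, by omega, by omega⟩ (Or.inl (by omega))
        rw [hout1, hout2]
        exact iRec x hax (by omega) j hbj hjS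

lemma pvPassA (S : Int) (m : List (List Int)) (c : Int × Int) (hS : 0 ≤ S)
    (ha0 : 0 ≤ c.1) (haS : c.1 ≤ S) (hb0 : 0 ≤ c.2) (hbS : c.2 ≤ S) (hWF : pvWF S m) :
    pvWF S (pvCoinPass S m c) ∧
    (∀ x y, pvInG S x y → (x < c.1 ∨ y < c.2) → pvGet2 (pvCoinPass S m c) x y = pvGet2 m x y) ∧
    (∀ x y, c.1 ≤ x → x ≤ S → c.2 ≤ y → y ≤ S →
      pvGet2 (pvCoinPass S m c) x y =
        min (pvGet2 m x y) (pvGet2 (pvCoinPass S m c) (x - c.1) (y - c.2) + 1)) := by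
  have h := pvOutA S c.1 c.2 m hS ha0 hb0 hbS hWF (S + 1 - c.1).toNat (by omega)
  rw [show c.1 + (((S + 1 - c.1).toNat : Nat) : Int) = S + 1 by omega] at h
  rw [pvCoinPass_eq]
  obtain ⟨h1, h2, h3⟩ := h
  refine ⟨h1, ?_, fun x y hx1 hx2 hy1 hy2 => h3 x hx1 (by omega) y hy1 hy2⟩
  intro x y hxy hc
  apply h2 x y hxy
  rcases hc with h | h
  · exact Or.inl h
  · exact Or.inr (Or.inr h)

lemma pvCoinPass_id (S : Int) (m : List (List Int)) (c : Int × Int)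
    (h : S < c.1 ∨ S < c.2) : pvCoinPass S m c = m := by
  rcases h with h | h
  · rw [pvCoinPass, PySem.List.pyRange_one_eq_nil (by omega : S + 1 ≤ c.1)]
    rfl
  · rw [pvCoinPass, PySem.List.pyRange_one_eq_nil (by omega : S + 1 ≤ c.2)]
    simp only [List.foldl_nil]
    exact PySem.List.foldl_ignore _ _

lemma pvChainA (S : Int) (m : List (List Int)) (c : Int × Int) (hS : 0 ≤ S)
    (ha0 : 0 ≤ c.1) (haS : c.1 ≤ S) (hb0 : 0 ≤ c.2) (hbS : c.2 ≤ S) (hWF : pvWF S m) :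
    ∀ k : Nat, ∀ x y : Int, 0 ≤ x - (k : Int) * c.1 → 0 ≤ y - (k : Int) * c.2 → x ≤ S → y ≤ S →
      pvGet2 (pvCoinPass S m c) x y ≤
        pvGet2 (pvCoinPass S m c) (x - (k : Int) * c.1) (y - (k : Int) * c.2) + (k : Int) := by
  intro k
  induction k with
  | zero => intro x y _ _ _ _; simp
  | succ n ih =>
    intro x y h1 h2 h3 h4
    have hc : (((n + 1 : Nat)) : Int) = (n : Int) + 1 := by push_cast; ring
    rw [hc] at h1 h2 ⊢
    have ht1 : 0 ≤ (n : Int) * c.1 := mul_nonneg (by positivity) ha0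
    have ht2 : 0 ≤ (n : Int) * c.2 := mul_nonneg (by positivity) hb0
    have e1 : ((n : Int) + 1) * c.1 = (n : Int) * c.1 + c.1 := by ring
    have e2 : ((n : Int) + 1) * c.2 = (n : Int) * c.2 + c.2 := by ring
    rw [e1] at h1 ⊢
    rw [e2] at h2 ⊢
    have hx1 : c.1 ≤ x := by linarith
    have hy1 : c.2 ≤ y := by linarith
    have hrec := (pvPassA S m c hS ha0 haS hb0 hbS hWF).2.2 x y hx1 h3 hy1 h4
    have hstep := ih (x - c.1) (y - c.2) (by linarith) (by linarith) (by linarith) (by linarith)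
    have harg1 : x - c.1 - (n : Int) * c.1 = x - ((n : Int) * c.1 + c.1) := by ring
    have harg2 : y - c.2 - (n : Int) * c.2 = y - ((n : Int) * c.2 + c.2) := by ring
    rw [harg1, harg2] at hstep
    have hmin : pvGet2 (pvCoinPass S m c) x y ≤
        pvGet2 (pvCoinPass S m c) (x - c.1) (y - c.2) + 1 := by
      rw [hrec]; exact min_le_right _ _
    linarith

lemma pvPassA_sound (S : Int) (coins : List (Int × Int)) (m : List (List Int)) (c : Int × Int)
    (hcm : c ∈ coins) (hS : 0 ≤ S) (ha0 : 0 ≤ c.1) (haS : c.1 ≤ S) (hb0 : 0 ≤ c.2) (hbS : c.2 ≤ S)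
    (hWF : pvWF S m) (hm : pvSound coins S (pvGet2 m)) :
    pvSound coins S (pvGet2 (pvCoinPass S m c)) := by
  obtain ⟨fWF, fOut, fRec⟩ := pvPassA S m c hS ha0 haS hb0 hbS hWF
  have key : ∀ n : Nat, ∀ x y, pvInG S x y → (x + y).toNat < n →
      pvGet2 (pvCoinPass S m c) x y ≤ pvINF ∧
      (pvGet2 (pvCoinPass S m c) x y = pvINF ∨
        ∃ l, pvOK coins S l ∧ pvS1 l = x ∧ pvS2 l = y ∧
          (l.length : Int) = pvGet2 (pvCoinPass S m c) x y) := by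
    intro n
    induction n with
    | zero => intro x y _ h; omega
    | succ n ih =>
      intro x y hxy hlt
      obtain ⟨hx0, hxS, hy0, hyS⟩ := hxy
      by_cases hreg : c.1 ≤ x ∧ c.2 ≤ y
      · have hrec := fRec x y hreg.1 hxS hreg.2 hyS
        have hmINF := (hm x y ⟨hx0, hxS, hy0, hyS⟩).1
        rcases le_total (pvGet2 m x y)
            (pvGet2 (pvCoinPass S m c) (x - c.1) (y - c.2) + 1) with hle | hgt
        · have heq : pvGet2 (pvCoinPass S m c) x y = pvGet2 m x y := by
            rw [hrec]; omega
          rw [heq]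
          exact hm x y ⟨hx0, hxS, hy0, hyS⟩
        · have hFeq : pvGet2 (pvCoinPass S m c) x y =
              pvGet2 (pvCoinPass S m c) (x - c.1) (y - c.2) + 1 := by
            rw [hrec]; omega
          have hle_m : pvGet2 (pvCoinPass S m c) x y ≤ pvGet2 m x y := by
            rw [hrec]; exact min_le_left _ _
          by_cases h00 : c.1 = 0 ∧ c.2 = 0
          · exfalso
            rw [h00.1, h00.2, sub_zero, sub_zero] at hFeq
            omega
          · have hsum1 : 1 ≤ c.1 + c.2 := by
              rcases (not_and_or.1 h00) with h | h
              · omega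
              · omega
            have hprev : pvInG S (x - c.1) (y - c.2) := ⟨by omega, by omega, by omega, by omega⟩
            have hmeasure : ((x - c.1) + (y - c.2)).toNat < n := by omega
            obtain ⟨pINF, pach⟩ := ih (x - c.1) (y - c.2) hprev hmeasure
            refine ⟨by omega, ?_⟩
            rcases pach with hp | ⟨l, hlOK, hl1, hl2, hl3⟩
            · exfalso
              rw [hp] at hFeq
              omega
            · right
              refine ⟨l ++ [c], ?_, ?_, ?_, ?_⟩
              · intro d hd
                rcases List.mem_append.1 hd with hd | hd
                · exact hlOK d hd
                · rw [List.mem_singleton.1 hd]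
                  exact ⟨hcm, ha0, haS, hb0, hbS⟩
              · rw [pvS1_append, hl1, pvS1_singleton]; ring
              · rw [pvS2_append, hl2, pvS2_singleton]; ring
              · rw [List.length_append, List.length_singleton]
                push_cast
                omega
      · have heq : pvGet2 (pvCoinPass S m c) x y = pvGet2 m x y :=
          fOut x y ⟨hx0, hxS, hy0, hyS⟩ (by omega)
        rw [heq]
        exact hm x y ⟨hx0, hxS, hy0, hyS⟩
  intro x y hxy
  exact key ((x + y).toNat + 1) x y hxy (by omega)

lemma pvPassA_comp (S : Int) (m : List (List Int)) (c : Int × Int) (done : List (Int × Int))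
    (hS : 0 ≤ S) (ha0 : 0 ≤ c.1) (haS : c.1 ≤ S) (hb0 : 0 ≤ c.2) (hbS : c.2 ≤ S)
    (hWF : pvWF S m) (hcomp : pvComp done S (pvGet2 m)) :
    pvComp (done ++ [c]) S (pvGet2 (pvCoinPass S m c)) := by
  obtain ⟨fWF, fOut, fRec⟩ := pvPassA S m c hS ha0 haS hb0 hbS hWF
  have hFle : ∀ x y, pvInG S x y → pvGet2 (pvCoinPass S m c) x y ≤ pvGet2 m x y := by
    intro x y hxy
    by_cases hreg : c.1 ≤ x ∧ c.2 ≤ y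
    · rw [fRec x y hreg.1 hxy.2.1 hreg.2 hxy.2.2.2]
      exact min_le_left _ _
    · rw [fOut x y hxy (by omega)]
  intro l hOK h1 h2
  obtain ⟨e1, e2, e3⟩ := pvSplit c l
  set l' := l.filter (fun x => x ≠ c) with hl'
  have hl'OK : pvOK done S l' := by
    intro d hd
    have hdd := List.mem_filter.1 hd
    have hdl : d ∈ l := hdd.1
    have hne : d ≠ c := by simpa using hdd.2
    obtain ⟨hmem', hb1, hb2, hb3, hb4⟩ := hOK d hdl
    rcases List.mem_append.1 hmem' with h | h
    · exact ⟨h, hb1, hb2, hb3, hb4⟩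
    · exact absurd (List.mem_singleton.1 h) hne
  have hcnt0 : 0 ≤ ((l.count c : Nat) : Int) * c.1 := mul_nonneg (by positivity) ha0
  have hcnt0' : 0 ≤ ((l.count c : Nat) : Int) * c.2 := mul_nonneg (by positivity) hb0
  have h1' : 0 ≤ pvS1 l' := pvS1_nonneg _ (fun d hd => (hl'OK d hd).2.1)
  have h2' : 0 ≤ pvS2 l' := pvS2_nonneg _ (fun d hd => (hl'OK d hd).2.2.2.1)
  have hcl : pvGet2 m (pvS1 l') (pvS2 l') ≤ (l'.length : Int) :=
    hcomp l' hl'OK (by linarith) (by linarith)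
  have hs10 : 0 ≤ pvS1 l := by linarith
  have hs20 : 0 ≤ pvS2 l := by linarith
  have hchain := pvChainA S m c hS ha0 haS hb0 hbS hWF (l.count c) (pvS1 l) (pvS2 l)
    (by linarith) (by linarith) h1 h2
  have harg1 : pvS1 l - ((l.count c : Nat) : Int) * c.1 = pvS1 l' := by linarith
  have harg2 : pvS2 l - ((l.count c : Nat) : Int) * c.2 = pvS2 l' := by linarith
  rw [harg1, harg2] at hchain
  have hF_at : pvGet2 (pvCoinPass S m c) (pvS1 l') (pvS2 l') ≤ pvGet2 m (pvS1 l') (pvS2 l') :=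
    hFle _ _ ⟨h1', by linarith, h2', by linarith⟩
  linarith

lemma pvFoldCoinsA (S : Int) (coins : List (Int × Int)) (hS : 0 ≤ S) :
    ∀ cs done m, (∀ d ∈ cs, pvPreCoin S d) → (∀ d ∈ cs, d ∈ coins) →
      pvWF S m → pvSound coins S (pvGet2 m) → pvComp done S (pvGet2 m) →
      pvWF S (cs.foldl (pvCoinPass S) m) ∧
      pvSound coins S (pvGet2 (cs.foldl (pvCoinPass S) m)) ∧
      pvComp (done ++ cs) S (pvGet2 (cs.foldl (pvCoinPass S) m)) := by
  intro cs
  induction cs with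
  | nil =>
    intro done m _ _ h1 h2 h3
    simpa using ⟨h1, h2, h3⟩
  | cons c cs ih =>
    intro done m hpre hmem hWF hsound hcomp
    rw [List.foldl_cons]
    have harr : done ++ c :: cs = (done ++ [c]) ++ cs := by simp
    by_cases husable : 0 ≤ c.1 ∧ c.1 ≤ S ∧ 0 ≤ c.2 ∧ c.2 ≤ S
    · obtain ⟨ha0, haS, hb0, hbS⟩ := husable
      have hWF' := (pvPassA S m c hS ha0 haS hb0 hbS hWF).1
      have hsound' := pvPassA_sound S coins m c (hmem c (by simp)) hS ha0 haS hb0 hbS hWF hsound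
      have hcomp' := pvPassA_comp S m c done hS ha0 haS hb0 hbS hWF hcomp
      have hrest := ih (done ++ [c]) (pvCoinPass S m c)
        (fun d hd => hpre d (by simp [hd])) (fun d hd => hmem d (by simp [hd]))
        hWF' hsound' hcomp'
      rw [harr]
      exact hrest
    · have hid : pvCoinPass S m c = m := by
        apply pvCoinPass_id
        have hp := hpre c (by simp)
        rw [pvPreCoin] at hp
        omega
      rw [hid]
      have hcomp2 : pvComp (done ++ [c]) S (pvGet2 m) := by
        intro l hOK h1 h2
        apply hcomp l ?_ h1 h2
        intro d hd
        obtain ⟨hmem', hb1, hb2, hb3, hb4⟩ := hOK d hd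
        rcases List.mem_append.1 hmem' with h | h
        · exact ⟨h, hb1, hb2, hb3, hb4⟩
        · exfalso
          have hdc : d = c := List.mem_singleton.1 h
          subst hdc
          exact husable ⟨hb1, hb2, hb3, hb4⟩
      have hrest := ih (done ++ [c]) m
        (fun d hd => hpre d (by simp [hd])) (fun d hd => hmem d (by simp [hd]))
        hWF hsound hcomp2
      rw [harr]
      exact hrest

lemma pvTableA (S : Int) (coins : List (Int × Int)) (hS : 0 ≤ S)
    (hpre : ∀ d ∈ coins, pvPreCoin S d) :
    pvSound coins S (pvGet2 (coins.foldl (pvCoinPass S) (pvSet2 (pvMemo0 S) 0 0 0))) ∧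
    pvComp coins S (pvGet2 (coins.foldl (pvCoinPass S) (pvSet2 (pvMemo0 S) 0 0 0))) := by
  have hin00 : pvInG S 0 0 := ⟨le_rfl, hS, le_rfl, hS⟩
  have hWF0 : pvWF S (pvSet2 (pvMemo0 S) 0 0 0) := pvWF_set2 hS (pvWF_memo0 S) hin00 0
  have hview : ∀ x y, pvInG S x y →
      pvGet2 (pvSet2 (pvMemo0 S) 0 0 0) x y = if x = 0 ∧ y = 0 then 0 else pvINF := by
    intro x y hxy
    rw [pvGet2_set hS (pvWF_memo0 S) hin00 hxy]
    by_cases h : x = 0 ∧ y = 0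
    · rw [if_pos h, if_pos h]
    · rw [if_neg h, if_neg h, pvGet2_memo0 hxy]
  have hsound0 : pvSound coins S (pvGet2 (pvSet2 (pvMemo0 S) 0 0 0)) := by
    intro x y hxy
    rw [hview x y hxy]
    by_cases h : x = 0 ∧ y = 0
    · rw [if_pos h]
      have := pvINF_pos
      refine ⟨by omega, Or.inr ⟨[], ?_, ?_, ?_, ?_⟩⟩
      · intro d hd; exact absurd hd (List.not_mem_nil)
      · rw [show pvS1 [] = 0 by simp [pvS1], h.1]
      · rw [show pvS2 [] = 0 by simp [pvS2], h.2]
      · simp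
    · rw [if_neg h]
      exact ⟨le_rfl, Or.inl rfl⟩
  have hcomp0 : pvComp [] S (pvGet2 (pvSet2 (pvMemo0 S) 0 0 0)) := by
    intro l hOK h1 h2
    have hl : l = [] := by
      cases l with
      | nil => rfl
      | cons d t => exact absurd (hOK d (by simp)).1 (List.not_mem_nil)
    subst hl
    rw [show pvS1 [] = 0 by simp [pvS1], show pvS2 [] = 0 by simp [pvS2], hview 0 0 hin00]
    simp
  have hres := pvFoldCoinsA S coins hS coins [] _ hpre (fun d hd => hd) hWF0 hsound0 hcomp0
  exact ⟨hres.2.1, by simpa using hres.2.2⟩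

-- ---- generic bounded-min fold helpers ----
lemma pvFoldLeInit {α : Type} (f : Int → α → Int) (h : ∀ b x, f b x ≤ b) :
    ∀ (l : List α) (b : Int), l.foldl f b ≤ b := by
  intro l
  induction l with
  | nil => intro b; simp
  | cons x t ih => intro b; exact le_trans (ih (f b x)) (h b x)

lemma pvFoldLeMem {α : Type} (f : Int → α → Int) (h : ∀ b x, f b x ≤ b) (t : α) (K : Int)
    (ht : ∀ b, f b t ≤ K) : ∀ (l : List α) (b : Int), t ∈ l → l.foldl f b ≤ K := by
  intro l
  induction l with
  | nil => intro b hm; cases hm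
  | cons x s ih =>
    intro b hm
    rcases List.mem_cons.1 hm with rfl | hm
    · exact le_trans (pvFoldLeInit f h s (f b t)) (ht b)
    · exact ih (f b x) hm

-- ---- A's final scan, characterized ----
def pvScan (S : Int) (T : Int → Int → Int) : Int :=
  (PySem.List.pyRange 0 (S + 1) 1).foldl (fun mn i =>
    (PySem.List.pyRange 0 (S + 1) 1).foldl (fun mn j =>
      if i ^ 2 + j ^ 2 = S ^ 2 then min mn (T i j) else mn) mn) pvINF

lemma pvScanInnerDec (S : Int) (T : Int → Int → Int) (i : Int) :
    ∀ (b : Int) (j : Int), (if i ^ 2 + j ^ 2 = S ^ 2 then min b (T i j) else b) ≤ b := by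
  intro b j
  split_ifs with h
  · exact min_le_left _ _
  · exact le_rfl

lemma pvScanOuterDec (S : Int) (T : Int → Int → Int) :
    ∀ (b : Int) (i : Int),
      (PySem.List.pyRange 0 (S + 1) 1).foldl
        (fun mn j => if i ^ 2 + j ^ 2 = S ^ 2 then min mn (T i j) else mn) b ≤ b := by
  intro b i
  exact pvFoldLeInit _ (pvScanInnerDec S T i) _ _

lemma pvScan_le (S : Int) (T : Int → Int → Int) : pvScan S T ≤ pvINF :=
  pvFoldLeInit _ (pvScanOuterDec S T) _ _

lemma pvScan_ach (S : Int) (T : Int → Int → Int) :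
    pvScan S T = pvINF ∨ ∃ x y, pvInG S x y ∧ x ^ 2 + y ^ 2 = S ^ 2 ∧ pvScan S T = T x y := by
  rw [pvScan]
  refine List.foldlRecOn _ _ (motive := fun mn =>
    mn = pvINF ∨ ∃ x y, pvInG S x y ∧ x ^ 2 + y ^ 2 = S ^ 2 ∧ mn = T x y) (Or.inl rfl) ?_
  intro b hb i hi
  have hib : 0 ≤ i ∧ i < S + 1 := PySem.List.mem_pyRange_one.1 hi
  refine List.foldlRecOn _ _ (motive := fun mn =>
    mn = pvINF ∨ ∃ x y, pvInG S x y ∧ x ^ 2 + y ^ 2 = S ^ 2 ∧ mn = T x y) hb ?_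
  intro b2 hb2 j hj
  have hjb : 0 ≤ j ∧ j < S + 1 := PySem.List.mem_pyRange_one.1 hj
  show (if i ^ 2 + j ^ 2 = S ^ 2 then min b2 (T i j) else b2) = pvINF ∨ _
  split_ifs with hcirc
  · rcases le_total b2 (T i j) with hle | hge
    · rw [min_eq_left hle]; exact hb2
    · rw [min_eq_right hge]
      exact Or.inr ⟨i, j, ⟨by omega, by omega, by omega, by omega⟩, hcirc, rfl⟩
  · exact hb2

lemma pvScan_lb (S : Int) (T : Int → Int → Int) :
    ∀ x y, pvInG S x y → x ^ 2 + y ^ 2 = S ^ 2 → pvScan S T ≤ T x y := by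
  intro x y hg hcirc
  obtain ⟨h1, h2, h3, h4⟩ := hg
  apply pvFoldLeMem _ (pvScanOuterDec S T) x (T x y) ?_ _ _
    (PySem.List.mem_pyRange_one.2 ⟨h1, by omega⟩)
  intro b
  exact pvFoldLeMem _ (pvScanInnerDec S T x) y (T x y)
    (fun b2 => by rw [if_pos hcirc]; exact min_le_right _ _) _ _
    (PySem.List.mem_pyRange_one.2 ⟨h3, by omega⟩)

-- ---- B's BFS, characterized ----
def pvGridN (S : Int) : Nat := (S + 1).toNat * (S + 1).toNat

def pvGridL (S : Int) : List (Int × Int) :=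
  (PySem.List.pyRange 0 (S + 1) 1).flatMap
    (fun i => (PySem.List.pyRange 0 (S + 1) 1).map (fun j => (i, j)))

lemma pvGridL_length (S : Int) : (pvGridL S).length = pvGridN S := by
  simp [pvGridL, pvGridN, List.length_flatMap, List.map_const', PySem.List.length_pyRange_one,
    Function.comp]

lemma pvGridL_mem (S : Int) (p : Int × Int) : p ∈ pvGridL S ↔ pvInG S p.1 p.2 := by
  cases p with
  | mk x y =>
    simp only [pvGridL, List.mem_flatMap, List.mem_map, PySem.List.mem_pyRange_one, pvInG]
    constructor
    · rintro ⟨i, ⟨hi0, hi1⟩, j, ⟨hj0, hj1⟩, heq⟩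
      obtain ⟨rfl, rfl⟩ : i = x ∧ j = y := by
        constructor <;> [exact (Prod.mk.injEq _ _ _ _ ▸ heq).1; exact (Prod.mk.injEq _ _ _ _ ▸ heq).2]
      exact ⟨hi0, by omega, hj0, by omega⟩
    · rintro ⟨h1, h2, h3, h4⟩
      exact ⟨x, ⟨h1, by omega⟩, y, ⟨h3, by omega⟩, rfl⟩

-- soundness of B's distance dictionary: every recorded distance is a representation length
def pvSoundB (coins : List (Int × Int)) (S : Int) (D : PySem.Dict (Int × Int) Int) : Prop :=
  ∀ u d, D.get? u = some d → pvInG S u.1 u.2 ∧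
    ∃ l, pvOK coins S l ∧ pvS1 l = u.1 ∧ pvS2 l = u.2 ∧ (l.length : Int) = d

-- a state is relaxed: every coin edge out of it is recorded with distance ≤ d + 1
def pvRelaxedAt (coins : List (Int × Int)) (S : Int) (D : PySem.Dict (Int × Int) Int)
    (u : Int × Int) (d : Int) : Prop :=
  ∀ c ∈ coins, u.1 + c.1 ≤ S → u.2 + c.2 ≤ S →
    ∃ d', D.get? (u.1 + c.1, u.2 + c.2) = some d' ∧ d' ≤ d + 1

-- the BFS loop invariant
def pvInv (coins : List (Int × Int)) (S : Int) (dist : PySem.Dict (Int × Int) Int)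
    (pending : List (Int × Int)) : Prop :=
  dist.keys.Nodup ∧
  pvSoundB coins S dist ∧
  dist.get? (0, 0) = some 0 ∧
  pending.Nodup ∧
  (∀ u ∈ pending, ∃ d, dist.get? u = some d) ∧
  (∀ u d, dist.get? u = some d → u ∈ pending ∨ pvRelaxedAt coins S dist u d) ∧
  (∀ u d, dist.get? u = some d → ∀ w ∈ pending, ∀ dw, dist.get? w = some dw → d ≤ dw + 1) ∧
  pending.Pairwise (fun a b => ∀ da db, dist.get? a = some da → dist.get? b = some db → da ≤ db)

lemma pvKeysLe (S : Int) (D : PySem.Dict (Int × Int) Int) (hnd : D.keys.Nodup)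
    (hg : ∀ k ∈ D.keys, pvInG S k.1 k.2) : D.keys.length ≤ pvGridN S := by
  rw [← pvGridL_length S]
  exact ((hnd.subperm (fun k hk => (pvGridL_mem S k).2 (hg k hk)))).length_le

-- the inner fold over coins (one dequeued state u with distance d), fully characterized
lemma pvFoldB (coins : List (Int × Int)) (S : Int) (u : Int × Int) (d : Int) :
    ∀ (cs : List (Int × Int)),
    ∀ (dist0 : PySem.Dict (Int × Int) Int) (acc0 : List (Int × Int)),
      dist0.keys.Nodup → (∀ w dw, dist0.get? w = some dw → dw ≤ d + 1) →
      ∃ new,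
        (cs.foldl (pvStepB S d u) (dist0, acc0)).2 = acc0 ++ new ∧
        (∀ w dw, dist0.get? w = some dw →
          (cs.foldl (pvStepB S d u) (dist0, acc0)).1.get? w = some dw) ∧
        (∀ w dw, (cs.foldl (pvStepB S d u) (dist0, acc0)).1.get? w = some dw →
          dist0.get? w = some dw ∨
          (dw = d + 1 ∧ ∃ c ∈ cs, w = (u.1 + c.1, u.2 + c.2) ∧ u.1 + c.1 ≤ S ∧ u.2 + c.2 ≤ S)) ∧
        (cs.foldl (pvStepB S d u) (dist0, acc0)).1.keys.Nodup ∧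
        new.Nodup ∧
        (∀ n ∈ new, (cs.foldl (pvStepB S d u) (dist0, acc0)).1.get? n = some (d + 1) ∧
          dist0.get? n = none) ∧
        (∀ w dw, (cs.foldl (pvStepB S d u) (dist0, acc0)).1.get? w = some dw →
          dist0.get? w = none → w ∈ new) ∧
        (cs.foldl (pvStepB S d u) (dist0, acc0)).1.keys.length =
          dist0.keys.length + new.length ∧
        (∀ c ∈ cs, u.1 + c.1 ≤ S → u.2 + c.2 ≤ S →
          ∃ d', (cs.foldl (pvStepB S d u) (dist0, acc0)).1.get? (u.1 + c.1, u.2 + c.2) = some d' ∧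
            d' ≤ d + 1) ∧
        (∀ w dw, (cs.foldl (pvStepB S d u) (dist0, acc0)).1.get? w = some dw → dw ≤ d + 1) := by
  intro cs
  induction cs with
  | nil =>
    intro dist0 acc0 hnd hbd
    refine ⟨[], by simp, fun w dw h => h, fun w dw h => Or.inl h, hnd, List.nodup_nil,
      fun n hn => absurd hn (List.not_mem_nil), ?_, by simp,
      fun c hc => absurd hc (List.not_mem_nil), hbd⟩
    intro w dw h hnone
    rw [List.foldl_nil] at h
    rw [h] at hnone
    cases hnone
  | cons c cs ih =>
    intro dist0 acc0 hnd hbd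
    rw [List.foldl_cons]
    by_cases hcond : (u.1 + c.1 ≤ S ∧ u.2 + c.2 ≤ S ∧ dist0.contains (u.1 + c.1, u.2 + c.2) = false)
    · have hstep : pvStepB S d u (dist0, acc0) c =
          (dist0.insert (u.1 + c.1, u.2 + c.2) (d + 1), acc0 ++ [(u.1 + c.1, u.2 + c.2)]) := by
        rw [pvStepB]; exact if_pos hcond
      set v : Int × Int := (u.1 + c.1, u.2 + c.2) with hv
      have hvnone : dist0.get? v = none := by
        have hc2 := hcond.2.2
        rw [PySem.Dict.contains_eq_isSome_get?] at hc2
        cases h : dist0.get? v with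
        | none => rfl
        | some dv => rw [h] at hc2; simp at hc2
      have hnd1 : (dist0.insert v (d + 1)).keys.Nodup := PySem.Dict.nodup_keys_insert _ _ _ hnd
      have hbd1 : ∀ w dw, (dist0.insert v (d + 1)).get? w = some dw → dw ≤ d + 1 := by
        intro w dw h
        rw [PySem.Dict.get?_insert] at h
        split_ifs at h with hw
        · have := Option.some.inj h; omega
        · exact hbd w dw h
      obtain ⟨new', e_acc, e_mono, e_cls, e_nd, e_ndnew, e_new, e_newmem, e_len, e_relax, e_bd⟩ :=
        ih (dist0.insert v (d + 1)) (acc0 ++ [v]) hnd1 hbd1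
      have hmono0 : ∀ w dw, dist0.get? w = some dw → (dist0.insert v (d + 1)).get? w = some dw := by
        intro w dw h
        rw [PySem.Dict.get?_insert]
        split_ifs with hw
        · rw [hw] at h; rw [h] at hvnone; cases hvnone
        · exact h
      refine ⟨v :: new', ?_, ?_, ?_, ?_, ?_, ?_, ?_, ?_, ?_, ?_⟩
      · rw [hstep, e_acc]; simp
      · intro w dw h
        rw [hstep]
        exact e_mono w dw (hmono0 w dw h)
      · intro w dw h
        rw [hstep] at h
        rcases e_cls w dw h with h' | ⟨hdw, c', hc', hw, hb1, hb2⟩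
        · rw [PySem.Dict.get?_insert] at h'
          split_ifs at h' with hw
          · right
            refine ⟨(Option.some.inj h').symm, c, by simp, ?_, hcond.1, hcond.2.1⟩
            rw [hw]
          · exact Or.inl h'
        · exact Or.inr ⟨hdw, c', by simp [hc'], hw, hb1, hb2⟩
      · rw [hstep]; exact e_nd
      · refine List.Nodup.cons ?_ e_ndnew
        intro hvnew
        have h2 := (e_new v hvnew).2
        rw [PySem.Dict.get?_insert, if_pos rfl] at h2
        cases h2
      · intro n hn
        rcases List.mem_cons.1 hn with rfl | hn
        · refine ⟨?_, hvnone⟩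
          rw [hstep]
          exact e_mono v (d + 1) (by rw [PySem.Dict.get?_insert, if_pos rfl])
        · obtain ⟨h1, h2⟩ := e_new n hn
          refine ⟨by rw [hstep]; exact h1, ?_⟩
          rw [PySem.Dict.get?_insert] at h2
          split_ifs at h2 with hw
          exact h2
      · intro w dw h hnone
        rw [hstep] at h
        by_cases hwv : w = v
        · exact List.mem_cons.2 (Or.inl hwv)
        · refine List.mem_cons.2 (Or.inr (e_newmem w dw h ?_))
          rw [PySem.Dict.get?_insert, if_neg hwv]
          exact hnone
      · rw [hstep, e_len, PySem.Dict.keys_insert_of_not_contains _ _ hcond.2.2]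
        simp
        omega
      · intro c' hc' h1 h2
        rcases List.mem_cons.1 hc' with rfl | hc'
        · refine ⟨d + 1, ?_, le_rfl⟩
          rw [hstep]
          exact e_mono v (d + 1) (by rw [PySem.Dict.get?_insert, if_pos rfl])
        · rw [hstep]
          exact e_relax c' hc' h1 h2
      · intro w dw h
        rw [hstep] at h
        exact e_bd w dw h
    · have hstep : pvStepB S d u (dist0, acc0) c = (dist0, acc0) := by
        rw [pvStepB]; exact if_neg hcond
      obtain ⟨new', e_acc, e_mono, e_cls, e_nd, e_ndnew, e_new, e_newmem, e_len, e_relax, e_bd⟩ :=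
        ih dist0 acc0 hnd hbd
      refine ⟨new', by rw [hstep]; exact e_acc, by rw [hstep]; exact e_mono, ?_,
        by rw [hstep]; exact e_nd, e_ndnew, by rw [hstep]; exact e_new,
        by rw [hstep]; exact e_newmem, by rw [hstep]; exact e_len, ?_,
        by rw [hstep]; exact e_bd⟩
      · intro w dw h
        rw [hstep] at h
        rcases e_cls w dw h with h' | ⟨hdw, c', hc', hrest⟩
        · exact Or.inl h'
        · exact Or.inr ⟨hdw, c', by simp [hc'], hrest⟩
      · intro c' hc' h1 h2
        rw [hstep]
        rcases List.mem_cons.1 hc' with rfl | hc'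
        · -- the target was already present: its recorded value is bounded by d + 1
          have hcont : dist0.contains (u.1 + c'.1, u.2 + c'.2) = true := by
            by_contra hfalse
            rw [Bool.not_eq_true] at hfalse
            exact hcond ⟨h1, h2, hfalse⟩
          rw [PySem.Dict.contains_eq_isSome_get?] at hcont
          cases hget : dist0.get? (u.1 + c'.1, u.2 + c'.2) with
          | none => rw [hget] at hcont; cases hcont
          | some dv => exact ⟨dv, e_mono _ _ hget, hbd _ _ hget⟩
        · exact e_relax c' hc' h1 h2

-- the whole BFS loop: invariant in, final-table properties out
lemma pvBfsMain (coins : List (Int × Int)) (S : Int) (hS : 0 ≤ S)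
    (hPre : ∀ c ∈ coins, pvPreCoin S c) :
    ∀ (fuel : Nat) (dist : PySem.Dict (Int × Int) Int) (pending : List (Int × Int)),
      pvInv coins S dist pending →
      2 * pvGridN S + pending.length ≤ 2 * dist.keys.length + fuel →
      (∀ u d, dist.get? u = some d → (pvBfsB coins S fuel dist pending).get? u = some d) ∧
      (pvBfsB coins S fuel dist pending).keys.Nodup ∧
      pvSoundB coins S (pvBfsB coins S fuel dist pending) ∧
      (pvBfsB coins S fuel dist pending).get? (0, 0) = some 0 ∧
      (∀ u d, (pvBfsB coins S fuel dist pending).get? u = some d →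
        pvRelaxedAt coins S (pvBfsB coins S fuel dist pending) u d) := by
  intro fuel
  induction fuel with
  | zero =>
    intro dist pending hinv hfuel
    obtain ⟨hnd, hsound, h00, hpnd, hpk, hrel, hbd, hpair⟩ := hinv
    cases pending with
    | nil =>
      refine ⟨fun u d h => h, hnd, hsound, h00, ?_⟩
      intro u d h
      rcases hrel u d h with hmem | hr
      · exact absurd hmem (List.not_mem_nil)
      · exact hr
    | cons u rest =>
      exfalso
      have hkg : ∀ k ∈ dist.keys, pvInG S k.1 k.2 := by
        intro k hk
        have hne : dist.get? k ≠ none := fun hnone =>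
          ((PySem.Dict.get?_eq_none_iff_not_mem_keys dist k).1 hnone) hk
        cases hget : dist.get? k with
        | none => exact absurd hget hne
        | some dk => exact (hsound k dk hget).1
      have := pvKeysLe S dist hnd hkg
      simp only [List.length_cons] at hfuel
      omega
  | succ fuel ih =>
    intro dist pending hinv hfuel
    obtain ⟨hnd, hsound, h00, hpnd, hpk, hrel, hbd, hpair⟩ := hinv
    cases pending with
    | nil =>
      refine ⟨fun u d h => h, hnd, hsound, h00, ?_⟩
      intro u d h
      rcases hrel u d h with hmem | hr
      · exact absurd hmem (List.not_mem_nil)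
      · exact hr
    | cons u rest =>
      obtain ⟨du, hdu⟩ := hpk u (by simp)
      have hgetD : dist.getD u 0 = du := by
        rw [PySem.Dict.getD_eq_get?_getD, hdu]
        rfl
      have hbdu : ∀ w dw, dist.get? w = some dw → dw ≤ du + 1 := by
        intro w dw h
        exact hbd w dw h u (by simp) du hdu
      obtain ⟨new, e_acc, e_mono, e_cls, e_nd, e_ndnew, e_new, e_newmem, e_len, e_relax, e_bd⟩ :=
        pvFoldB coins S u du coins dist [] hnd hbdu
      set st := coins.foldl (pvStepB S du u) (dist, ([] : List (Int × Int))) with hst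
      have e_acc' : st.2 = new := by rw [e_acc]; simp
      have hunfold : pvBfsB coins S (fuel + 1) dist (u :: rest) =
          pvBfsB coins S fuel st.1 (rest ++ st.2) := by
        rw [pvBfsB, hgetD]
      rw [hunfold, e_acc']
      have huG : pvInG S u.1 u.2 := (hsound u du hdu).1
      obtain ⟨lu, hluOK, hlu1, hlu2, hlu3⟩ := (hsound u du hdu).2
      have hrest_not_new : ∀ w ∈ rest, w ∉ new := by
        intro w hw hmem
        obtain ⟨dw, hdw⟩ := hpk w (by simp [hw])
        rw [(e_new w hmem).2] at hdw
        cases hdw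
      have hu_not_rest : u ∉ rest := (List.nodup_cons.1 hpnd).1
      -- the invariant survives the step
      have hinv' : pvInv coins S st.1 (rest ++ new) := by
        refine ⟨e_nd, ?_, e_mono _ _ h00, ?_, ?_, ?_, ?_, ?_⟩
        · -- soundness of every recorded distance
          intro w dw h
          rcases e_cls w dw h with h' | ⟨hdw, c, hc, hw, hb1, hb2⟩
          · exact hsound w dw h'
          · have hpc := hPre c hc
            rw [pvPreCoin] at hpc
            have hc1S : c.1 ≤ S := by have := huG.1; omega
            have hc2S : c.2 ≤ S := by have := huG.2.2.1; omega
            have hc1 : 0 ≤ c.1 := by omega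
            have hc2 : 0 ≤ c.2 := by omega
            have hwG : pvInG S w.1 w.2 := by
              rw [hw]
              exact ⟨by have := huG.1; omega, by simpa using hb1,
                by have := huG.2.2.1; omega, by simpa using hb2⟩
            refine ⟨hwG, lu ++ [c], ?_, ?_, ?_, ?_⟩
            · intro e he
              rcases List.mem_append.1 he with he | he
              · exact hluOK e he
              · rw [List.mem_singleton.1 he]
                exact ⟨hc, hc1, hc1S, hc2, hc2S⟩
            · rw [pvS1_append, hlu1, pvS1_singleton, hw]
            · rw [pvS2_append, hlu2, pvS2_singleton, hw]
            · rw [List.length_append, List.length_singleton]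
              push_cast
              omega
        · -- pending list has no duplicates
          rw [List.nodup_append]
          exact ⟨(List.nodup_cons.1 hpnd).2, e_ndnew,
            fun w hw b hb heq => hrest_not_new w hw (heq ▸ hb)⟩
        · -- every pending state is recorded
          intro w hw
          rcases List.mem_append.1 hw with hw | hw
          · obtain ⟨dw, hdw⟩ := hpk w (by simp [hw])
            exact ⟨dw, e_mono _ _ hdw⟩
          · exact ⟨du + 1, (e_new w hw).1⟩
        · -- every recorded state is pending or relaxed
          intro w dw h
          cases hget : dist.get? w with
          | none =>
            exact Or.inl (List.mem_append_right _ (e_newmem w dw h hget))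
          | some dv =>
            have hdveq : dw = dv := by
              have := e_mono _ _ hget
              exact (Option.some.inj ((e_mono _ _ hget).symm.trans h)).symm
            subst hdveq
            rcases hrel w dw hget with hmem | hr
            · rcases List.mem_cons.1 hmem with rfl | hmem
              · -- w = u: the fold just relaxed it
                right
                have hdwdu : dw = du := Option.some.inj (hget.symm.trans hdu)
                subst hdwdu
                intro c hc hb1 hb2
                exact e_relax c hc hb1 hb2
              · exact Or.inl (List.mem_append_left _ hmem)
            · right
              intro c hc hb1 hb2
              obtain ⟨d', hd', hle⟩ := hr c hc hb1 hb2
              exact ⟨d', e_mono _ _ hd', hle⟩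
        · -- every recorded value ≤ any pending value + 1
          intro w dw h w' hw' dw' hdw'
          have hdwle : dw ≤ du + 1 := e_bd w dw h
          rcases List.mem_append.1 hw' with hw' | hw'
          · obtain ⟨dv, hdv⟩ := hpk w' (by simp [hw'])
            have hdv' : dw' = dv := (Option.some.inj ((e_mono _ _ hdv).symm.trans hdw')).symm
            subst hdv'
            have hdu_le : du ≤ dw' := by
              have hp := (List.pairwise_cons.1 hpair).1 w' hw'
              exact hp du dw' hdu hdv
            omega
          · have hnewv : dw' = du + 1 :=
              (Option.some.inj (((e_new w' hw').1).symm.trans hdw')).symm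
            omega
        · -- pending values are nondecreasing
          rw [List.pairwise_append]
          refine ⟨?_, ?_, ?_⟩
          · refine ((List.pairwise_cons.1 hpair).2).imp_of_mem ?_
            intro a b ha hb hab
            intro da db hda hdb
            obtain ⟨va, hva⟩ := hpk a (by simp [ha])
            obtain ⟨vb, hvb⟩ := hpk b (by simp [hb])
            have h1 : da = va := (Option.some.inj ((e_mono _ _ hva).symm.trans hda)).symm
            have h2 : db = vb := (Option.some.inj ((e_mono _ _ hvb).symm.trans hdb)).symm
            subst h1; subst h2
            exact hab da db hva hvb
          · apply List.pairwise_of_forall_mem_list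
            intro a ha b hb da db hda hdb
            have h1 : da = du + 1 := (Option.some.inj (((e_new a ha).1).symm.trans hda)).symm
            have h2 : db = du + 1 := (Option.some.inj (((e_new b hb).1).symm.trans hdb)).symm
            omega
          · intro a ha b hb da db hda hdb
            have h1 : da ≤ du + 1 := e_bd a da hda
            have h2 : db = du + 1 := (Option.some.inj (((e_new b hb).1).symm.trans hdb)).symm
            omega
      have hfuel' : 2 * pvGridN S + (rest ++ new).length ≤ 2 * st.1.keys.length + fuel := by
        rw [List.length_append, e_len]
        simp only [List.length_cons] at hfuel
        omega
      obtain ⟨m1, m2, m3, m4, m5⟩ := ih st.1 (rest ++ new) hinv' hfuel'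
      exact ⟨fun u' d' h' => m1 u' d' (e_mono u' d' h'), m2, m3, m4, m5⟩

-- completeness of the final BFS table: every representation's endpoint is recorded, within length
lemma pvCompB (coins : List (Int × Int)) (S : Int) (D : PySem.Dict (Int × Int) Int)
    (h00 : D.get? (0, 0) = some 0)
    (hrel : ∀ u d, D.get? u = some d → pvRelaxedAt coins S D u d) :
    ∀ l, pvOK coins S l → pvS1 l ≤ S → pvS2 l ≤ S →
      ∃ dd, D.get? (pvS1 l, pvS2 l) = some dd ∧ dd ≤ (l.length : Int) := by
  intro l
  induction l using List.reverseRecOn with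
  | nil =>
    intro _ _ _
    refine ⟨0, ?_, by simp⟩
    rw [show pvS1 [] = 0 by simp [pvS1], show pvS2 [] = 0 by simp [pvS2]]
    exact h00
  | append_singleton l c ih =>
    intro hOK h1 h2
    obtain ⟨hcm, hc1, hc1S, hc2, hc2S⟩ := hOK c (List.mem_append_right _ (by simp))
    have hOKl : pvOK coins S l := fun e he => hOK e (List.mem_append_left _ he)
    have hs1 : pvS1 (l ++ [c]) = pvS1 l + c.1 := by rw [pvS1_append, pvS1_singleton]
    have hs2 : pvS2 (l ++ [c]) = pvS2 l + c.2 := by rw [pvS2_append, pvS2_singleton]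
    rw [hs1] at h1
    rw [hs2] at h2
    obtain ⟨dd, hdd, hddle⟩ := ih hOKl (by omega) (by omega)
    obtain ⟨d', hd', hle⟩ := hrel (pvS1 l, pvS2 l) dd hdd c hcm (by simpa using h1) (by simpa using h2)
    refine ⟨d', ?_, ?_⟩
    · rw [hs1, hs2]
      exact hd'
    · rw [List.length_append, List.length_singleton]
      push_cast
      omega

-- B's final minimum scan over the dictionary items, characterized
def pvBestF (S : Int) (best : Int) (p : (Int × Int) × Int) : Int :=
  if p.1.1 * p.1.1 + p.1.2 * p.1.2 = S * S ∧ p.2 < best then p.2 else best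

lemma pvBestF_dec (S : Int) : ∀ (b : Int) (p : (Int × Int) × Int), pvBestF S b p ≤ b := by
  intro b p
  rw [pvBestF]
  split_ifs with h
  · omega
  · exact le_rfl

lemma pvBest_le (S : Int) (items : List ((Int × Int) × Int)) :
    items.foldl (pvBestF S) pvINF ≤ pvINF :=
  pvFoldLeInit _ (pvBestF_dec S) _ _

lemma pvBest_ach (S : Int) (items : List ((Int × Int) × Int)) :
    items.foldl (pvBestF S) pvINF = pvINF ∨
      ∃ p ∈ items, p.1.1 * p.1.1 + p.1.2 * p.1.2 = S * S ∧
        items.foldl (pvBestF S) pvINF = p.2 := by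
  refine List.foldlRecOn _ _ (motive := fun b =>
    b = pvINF ∨ ∃ p ∈ items, p.1.1 * p.1.1 + p.1.2 * p.1.2 = S * S ∧ b = p.2) (Or.inl rfl) ?_
  intro b hb p hp
  rw [pvBestF]
  split_ifs with h
  · exact Or.inr ⟨p, hp, h.1, rfl⟩
  · exact hb

lemma pvBest_lb (S : Int) (items : List ((Int × Int) × Int)) (p : (Int × Int) × Int)
    (hp : p ∈ items) (hcirc : p.1.1 * p.1.1 + p.1.2 * p.1.2 = S * S) :
    items.foldl (pvBestF S) pvINF ≤ p.2 := by
  apply pvFoldLeMem _ (pvBestF_dec S) p p.2 ?_ _ _ hp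
  intro b
  rw [pvBestF]
  split_ifs with h
  · exact le_rfl
  · rw [not_and_or] at h
    rcases h with h | h
    · exact absurd hcirc h
    · omega

-- rfl bridges between the ports and the proof-side functions
lemma pvSolve_eq (par : Int × Int × (List (Int × Int))) :
    solve par =
      (if pvScan par.2.1
          (fun x y => pvGet2 (par.2.2.foldl (pvCoinPass par.2.1)
            (pvSet2 (pvMemo0 par.2.1) 0 0 0)) x y) = pvINF
       then 0
       else pvScan par.2.1
          (fun x y => pvGet2 (par.2.2.foldl (pvCoinPass par.2.1)
            (pvSet2 (pvMemo0 par.2.1) 0 0 0)) x y)) := rfl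

lemma pvSolveAlt_eq (par : Int × Int × (List (Int × Int))) :
    solve_alt par =
      (if (pvBfsB par.2.2 par.2.1 (2 * pvGridN par.2.1)
            (PySem.Dict.ofList [(((0 : Int), (0 : Int)), (0 : Int))]) [(0, 0)]).items.foldl
            (pvBestF par.2.1) pvINF = pvINF
       then 0
       else (pvBfsB par.2.2 par.2.1 (2 * pvGridN par.2.1)
            (PySem.Dict.ofList [(((0 : Int), (0 : Int)), (0 : Int))]) [(0, 0)]).items.foldl
            (pvBestF par.2.1) pvINF) := rfl

theorem solve_spec : Claim_equal_solve := by
  intro par hdom hpre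
  obtain ⟨hS, hco⟩ := hpre
  show solve par = solve_alt par
  set S := par.2.1 with hSdef
  set coins := par.2.2 with hcdef
  have hpreC : ∀ d ∈ coins, pvPreCoin S d := by
    intro d hd
    rw [pvPreCoin]
    exact hco d hd
  obtain ⟨hAs, hAc⟩ := pvTableA S coins hS hpreC
  set TA := fun x y => pvGet2 (coins.foldl (pvCoinPass S) (pvSet2 (pvMemo0 S) 0 0 0)) x y with hTAdef
  -- the initial BFS state
  set D0 : PySem.Dict (Int × Int) Int := PySem.Dict.ofList [(((0 : Int), (0 : Int)), (0 : Int))]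
    with hD0def
  have hD0 : D0 = (PySem.Dict.empty : PySem.Dict (Int × Int) Int).insert (0, 0) 0 := by decide
  have hget00 : D0.get? (0, 0) = some 0 := by decide
  have hgetgen : ∀ u d, D0.get? u = some d → u = ((0 : Int), (0 : Int)) ∧ d = 0 := by
    intro u d h
    rw [hD0, PySem.Dict.get?_insert] at h
    split_ifs at h with hu
    · exact ⟨hu, (Option.some.inj h).symm⟩
    · rw [PySem.Dict.get?_empty] at h
      cases h
  have hinv0 : pvInv coins S D0 [(0, 0)] := by
    refine ⟨by decide, ?_, hget00, by decide, ?_, ?_, ?_, ?_⟩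
    · intro u d h
      obtain ⟨rfl, rfl⟩ := hgetgen u d h
      refine ⟨⟨le_rfl, hS, le_rfl, hS⟩, [], fun e he => absurd he (List.not_mem_nil), ?_, ?_, by simp⟩
      · simp [pvS1]
      · simp [pvS2]
    · intro u hu
      rw [List.mem_singleton.1 hu]
      exact ⟨0, hget00⟩
    · intro u d h
      obtain ⟨rfl, rfl⟩ := hgetgen u d h
      exact Or.inl (by simp)
    · intro u d h w hw dw hdw
      obtain ⟨rfl, rfl⟩ := hgetgen u d h
      obtain ⟨_, rfl⟩ := hgetgen w dw hdw
      omega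
    · simp
  have hkeys0 : D0.keys.length = 1 := by decide
  have hfuel0 : 2 * pvGridN S + ([((0 : Int), (0 : Int))]).length ≤
      2 * D0.keys.length + 2 * pvGridN S := by
    rw [hkeys0]
    simp
  obtain ⟨_, hndD, hsoundD, h00D, hrelD⟩ :=
    pvBfsMain coins S hS hpreC (2 * pvGridN S) D0 [(0, 0)] hinv0 hfuel0
  set D := pvBfsB coins S (2 * pvGridN S) D0 [(0, 0)] with hDdef
  have hcompD := pvCompB coins S D h00D hrelD
  have hEq : pvScan S TA = D.items.foldl (pvBestF S) pvINF := by
    apply le_antisymm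
    · rcases pvBest_ach S D.items with hb | ⟨p, hp, hcirc, hbv⟩
      · rw [hb]
        exact pvScan_le S TA
      · rw [hbv]
        have hgetp : D.get? p.1 = some p.2 :=
          PySem.Dict.get?_of_mem_items D (by simpa using hp) hndD
        obtain ⟨hpG, l, hlOK, hl1, hl2, hl3⟩ := hsoundD p.1 p.2 hgetp
        have hTAle2 : TA p.1.1 p.1.2 ≤ p.2 := by
          have h := hAc l hlOK (by rw [hl1]; exact hpG.2.1) (by rw [hl2]; exact hpG.2.2.2)
          rw [hl1, hl2, hl3] at h
          exact h
        have hcirc2 : p.1.1 ^ 2 + p.1.2 ^ 2 = S ^ 2 := by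
          rw [pow_two, pow_two, pow_two]
          exact hcirc
        exact le_trans (pvScan_lb S TA p.1.1 p.1.2 hpG hcirc2) hTAle2
    · rcases pvScan_ach S TA with hs | ⟨x, y, hg, hcirc, hsv⟩
      · rw [hs]
        exact pvBest_le S D.items
      · rw [hsv]
        obtain ⟨hTAle, hach⟩ := hAs x y hg
        rcases hach with hI | ⟨l, hlOK, hl1, hl2, hl3⟩
        · have hIT : TA x y = pvINF := hI
          rw [hIT]
          exact pvBest_le S D.items
        · obtain ⟨dd, hdd, hddle⟩ := hcompD l hlOK (by rw [hl1]; exact hg.2.1)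
            (by rw [hl2]; exact hg.2.2.2)
          rw [hl1, hl2] at hdd
          have hmem := PySem.Dict.mem_items_of_get?_eq_some D hdd
          have hcirc' : x * x + y * y = S * S := by
            rw [pow_two, pow_two, pow_two] at hcirc
            exact hcirc
          have hlb := pvBest_lb S D.items ((x, y), dd) hmem (by simpa using hcirc')
          have hTAeq : TA x y = (l.length : Int) := hl3.symm
          rw [hTAeq]
          exact le_trans hlb hddle
  rw [pvSolve_eq, pvSolveAlt_eq, ← hSdef, ← hcdef, ← hTAdef, ← hD0def, ← hDdef, hEq]
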